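-- pv_equiv track=rewrite | github.com/mtuomiko/advent-of-code | 2020/19/19.py | split_on_emptyline
-- ===== SOURCE A (Python) =====
-- def split_on_emptyline(input):
--     '''
--     Split input string array to a tuple of two string arrays on first occurence of an empty line. Frist empty line
--     omitted from result.
--     '''
--     write_second_array = False
--     first_array = []
--     second_array = []
--     for line in input:
--         if line == '':  # two part input separated by an empty line
--             write_second_array = True
--         elif write_second_array:
--             second_array.append(line)
--         else:
--             first_array.append(line)
--     return first_array, second_array
-- ===== SOURCE B (Python) =====
-- def split_on_emptyline(input):
--     try:
--         i = input.index('')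
--     except ValueError:
--         return list(input), []
--     return input[:i], [x for x in input[i + 1:] if x != '']
-- ===== Notes on version B (the rewrite author's own statement) =====
-- stated objective: idiomatic
-- what changed: Replaces the single-pass boolean-flag accumulation with locate-then-slice: find the first empty line's index, slice the prefix, and filter blanks from the suffix.
import Mathlib
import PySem

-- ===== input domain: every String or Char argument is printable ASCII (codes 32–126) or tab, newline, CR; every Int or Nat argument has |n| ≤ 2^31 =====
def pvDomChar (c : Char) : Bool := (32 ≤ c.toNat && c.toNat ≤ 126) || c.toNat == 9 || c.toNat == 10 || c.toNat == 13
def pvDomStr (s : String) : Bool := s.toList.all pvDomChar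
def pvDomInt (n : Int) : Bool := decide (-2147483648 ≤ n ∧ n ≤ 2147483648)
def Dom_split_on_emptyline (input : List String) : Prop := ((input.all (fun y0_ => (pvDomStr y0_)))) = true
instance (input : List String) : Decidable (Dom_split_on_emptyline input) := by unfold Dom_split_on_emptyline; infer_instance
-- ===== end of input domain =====

-- B replaces A's one-pass boolean-flag accumulation by locate-then-slice (find the first
-- empty line, slice the prefix, filter blanks from the suffix); objective: idiomatic.

-- ===== PORT A =====
-- the loop state is (write_second_array, first_array, second_array)
def pvStepA (st : Bool × List String × List String) (line : String) :
    Bool × List String × List String :=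
  if line = "" then (true, st.2.1, st.2.2)
  else if st.1 then (st.1, st.2.1, st.2.2 ++ [line])
  else (st.1, st.2.1 ++ [line], st.2.2)

def split_on_emptyline (input : List String) : List String × List String :=
  let st := input.foldl pvStepA (false, [], [])
  (st.2.1, st.2.2)

-- ===== PORT B =====
-- input.index('') → PySem.List.index?; on success input[:i] = take i, input[i+1:] = drop (i+1)
-- (exact: i is a nonnegative in-range index here)
def split_on_emptyline_alt (input : List String) : List String × List String :=
  match PySem.List.index? input "" with
  | none => (input, [])
  | some i => (input.take i, (input.drop (i + 1)).filter (fun x => x ≠ ""))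

-- ===== PRECONDITION & SPEC =====
def Spec_split_on_emptyline (input : List String) (out : List String × List String) : Prop := out = split_on_emptyline_alt input
instance (input : List String) (out : List String × List String) : Decidable (Spec_split_on_emptyline input out) := by unfold Spec_split_on_emptyline; infer_instance

-- ===== CLAIM (what is proved, stated in full; the proofs are below) =====
def Claim_equal_split_on_emptyline : Prop := ∀ (input : List String), Dom_split_on_emptyline input → Spec_split_on_emptyline input (split_on_emptyline input)

-- ===== LEMMAS AND PROOFS =====

-- once the flag is true, the loop only appends non-empty lines to the second array
theorem pvFoldTrue (l : List String) (f s : List String) :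
    l.foldl pvStepA (true, f, s) = (true, f, s ++ l.filter (fun x => x ≠ "")) := by
  induction l generalizing s with
  | nil => simp
  | cons x xs ih =>
    by_cases hx : x = "" <;> simp [pvStepA, hx, ih]

-- with the flag still false, the loop's outcome is B's locate-then-slice result shifted by f
theorem pvFoldFalse (l : List String) (f : List String) :
    (let st := l.foldl pvStepA (false, f, []);
     (st.2.1, st.2.2)) =
    ((f ++ (split_on_emptyline_alt l).1, (split_on_emptyline_alt l).2)) := by
  induction l generalizing f with
  | nil => simp [split_on_emptyline_alt, PySem.List.index?]
  | cons x xs ih =>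
    by_cases hx : x = ""
    · subst hx
      have h0 : PySem.List.index? ("" :: xs) "" = some 0 :=
        PySem.List.index?_cons_self "" xs
      rw [PySem.List.index?_eq_idxOf?] at h0
      simp [pvStepA, pvFoldTrue, split_on_emptyline_alt, h0]
    · have h1 : PySem.List.index? (x :: xs) "" = (PySem.List.index? xs "").map (· + 1) :=
        PySem.List.index?_cons_of_ne xs hx
      simp only [List.foldl_cons, pvStepA, if_neg hx, if_neg (Bool.false_ne_true)]
      rw [ih (f ++ [x])]
      simp only [PySem.List.index?_eq_idxOf?] at h1
      cases hidx : List.idxOf? "" xs with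
      | none =>
        simp [split_on_emptyline_alt, PySem.List.index?_eq_idxOf?, h1, hidx]
      | some i =>
        simp [split_on_emptyline_alt, PySem.List.index?_eq_idxOf?, h1, hidx,
          List.take_succ_cons]

-- ===== VERDICT (by name: the statement is the Claim_ definition above) =====
theorem split_on_emptyline_spec : Claim_equal_split_on_emptyline := by
  intro input _
  unfold Spec_split_on_emptyline split_on_emptyline
  have := pvFoldFalse input []
  simp only [List.nil_append] at this
  exact this
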